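-- pv_equiv track=rewrite | github.com/Whiteless7/TOC-Simon-s-Congruence-Pattern-Mining-Using-Simon-Tree | stree.py | comp_x
-- ===== SOURCE A (Python) =====
-- def comp_x(w):
--     """
--     Calculates array X. Uses from-0 indexing instead of from-1.
--     :param w: Target string.
--     :return: The array X. We denote 'inf' as n+2 for QoL.
--     """
--     n = len(w)
--     X = [-1] * n
--     last_occ = {}
--     for i in range(n, 0, -1):
--         try:
--             X[i-1] = last_occ[w[i-1]]
--             last_occ[w[i-1]] = i-1
--         except KeyError:
--             X[i-1] = n+2
--             last_occ[w[i-1]] = i-1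
--     return X
-- ===== SOURCE B (Python) =====
-- def comp_x(w):
--     """Dict-free variant: for each index j, scan forward directly for the first
--     later position holding the same character; n+2 if there is none."""
--     n = len(w)
--     return [next((k for k in range(j + 1, n) if w[k] == w[j]), n + 2)
--             for j in range(n)]
-- ===== Notes on version B (the rewrite author's own statement) =====
-- stated objective: simpler
-- what changed: Drops A's backward pass and last-occurrence dictionary entirely: B computes each entry independently by a direct forward scan for the next equal character (per-index brute force instead of a stateful dict pass).
import Mathlib
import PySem

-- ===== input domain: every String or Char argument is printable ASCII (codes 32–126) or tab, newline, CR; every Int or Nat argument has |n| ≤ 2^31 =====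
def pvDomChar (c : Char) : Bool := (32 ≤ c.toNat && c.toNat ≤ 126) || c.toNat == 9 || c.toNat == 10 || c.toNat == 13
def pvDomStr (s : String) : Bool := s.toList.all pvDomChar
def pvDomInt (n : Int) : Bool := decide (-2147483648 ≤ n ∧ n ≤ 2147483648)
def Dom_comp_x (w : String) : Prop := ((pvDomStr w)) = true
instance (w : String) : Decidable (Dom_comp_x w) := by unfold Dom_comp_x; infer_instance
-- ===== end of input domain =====

-- B drops A's backward pass and last-occurrence dictionary: it computes each entry
-- independently by a direct forward scan for the next equal character
-- (objective: simpler; not faster).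

-- ===== PORT A =====
-- loop body of A: for i in range(n,0,-1): try X[i-1]=last_occ[w[i-1]] except KeyError: X[i-1]=n+2; then last_occ[w[i-1]]=i-1
-- (the `none` arm of pyGet? is unreachable — 1 ≤ i ≤ n — and only makes the function total)
def stepA (l : List Char) (st : List Int × PySem.Dict Char Int) (i : Int) :
    List Int × PySem.Dict Char Int :=
  match PySem.List.pyGet? l (i - 1) with
  | none => st
  | some c =>
    match st.2.get? c with
    | some v => (st.1.set (i - 1).toNat v, st.2.insert c (i - 1))
    | none   => (st.1.set (i - 1).toNat ((l.length : Int) + 2), st.2.insert c (i - 1))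

def comp_x (w : String) : List Int :=
  ((PySem.List.pyRange (w.toList.length : Int) 0 (-1)).foldl (stepA w.toList)
      (List.replicate w.toList.length (-1), PySem.Dict.empty)).1

-- ===== PORT B =====
-- B: [next((k for k in range(j+1, n) if w[k] == w[j]), n + 2) for j in range(n)]
-- `next(gen, default)` = first element of the range passing the test, else the default
-- (the pyGet? comparisons are exact: both indices are in range on every reached call)
def comp_x_alt (w : String) : List Int :=
  (PySem.List.pyRange 0 (w.toList.length : Int) 1).map (fun j =>
    match (PySem.List.pyRange (j + 1) (w.toList.length : Int) 1).find? (fun k =>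
        PySem.List.pyGet? w.toList k == PySem.List.pyGet? w.toList j) with
    | some k => k
    | none => (w.toList.length : Int) + 2)

-- ===== PRECONDITION & SPEC =====
def Spec_comp_x (w : String) (out : List Int) : Prop := out = comp_x_alt w
instance (w : String) (out : List Int) : Decidable (Spec_comp_x w out) := by unfold Spec_comp_x; infer_instance

-- ===== CLAIM (what is proved, stated in full; the proofs are below) =====
def Claim_equal_comp_x : Prop := ∀ (w : String), Dom_comp_x w → Spec_comp_x w (comp_x w)

-- ===== LEMMAS AND PROOFS =====

-- first occurrence of c in l at an index ≥ s
def foFrom (l : List Char) (s : Nat) (c : Char) : Option Nat :=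
  ((l.drop s).findIdx? (fun x => x == c)).map (fun k => s + k)

-- the next-occurrence value of position j (the common specification of both programs)
def nxt (l : List Char) (j : Nat) : Int :=
  match foFrom l (j + 1) (l.getD j ' ') with
  | some k => (k : Int)
  | none => (l.length : Int) + 2

lemma foFrom_eq_some_iff (l : List Char) (s : Nat) (c : Char) (k : Nat) :
    foFrom l s c = some k ↔
      s ≤ k ∧ k < l.length ∧ l.getD k ' ' = c ∧ ∀ i, s ≤ i → i < k → l.getD i ' ' ≠ c := by
  unfold foFrom
  rw [Option.map_eq_some_iff]
  constructor
  · rintro ⟨a, ha, rfl⟩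
    rw [List.findIdx?_eq_some_iff_getElem] at ha
    obtain ⟨h, hpa, hmin⟩ := ha
    rw [List.getElem_drop] at hpa
    have hlen : s + a < l.length := by have := l.length_drop (i := s); omega
    refine ⟨by omega, hlen, ?_, ?_⟩
    · rw [List.getD_eq_getElem _ _ hlen]; exact beq_iff_eq.mp hpa
    · intro i hsi hik
      have hj : i - s < a := by omega
      have := hmin (i - s) hj
      rw [List.getElem_drop] at this
      have hil : i < l.length := by omega
      rw [List.getD_eq_getElem _ _ hil]
      have h2 : s + (i - s) = i := by omega
      simp only [h2] at this
      intro hc; exact this (beq_iff_eq.mpr hc)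
  · rintro ⟨hsk, hkl, hc, hmin⟩
    refine ⟨k - s, ?_, by omega⟩
    rw [List.findIdx?_eq_some_iff_getElem]
    have hd : k - s < (l.drop s).length := by simp [List.length_drop]; omega
    refine ⟨hd, ?_, ?_⟩
    · rw [List.getElem_drop]
      have h2 : s + (k - s) = k := by omega
      rw [beq_iff_eq]
      rw [← List.getD_eq_getElem l ' ' (by omega)]
      simp only [h2]
      exact hc
    · intro j hj
      rw [List.getElem_drop]
      have hjl : s + j < l.length := by omega
      have := hmin (s + j) (by omega) (by omega)
      rw [List.getD_eq_getElem _ _ hjl] at this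
      simpa using this

lemma foFrom_eq_none_iff (l : List Char) (s : Nat) (c : Char) :
    foFrom l s c = none ↔ ∀ i, s ≤ i → i < l.length → l.getD i ' ' ≠ c := by
  unfold foFrom
  rw [Option.map_eq_none_iff, List.findIdx?_eq_none_iff]
  constructor
  · intro h i hsi hil
    have hm : l[i]'hil ∈ l.drop s := by
      rw [List.mem_iff_getElem]
      exact ⟨i - s, by simp [List.length_drop]; omega, by rw [List.getElem_drop]; congr 1; omega⟩
    have := h _ hm
    rw [List.getD_eq_getElem _ _ hil]
    intro hc; simp [hc] at this
  · intro h x hx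
    rw [List.mem_iff_getElem] at hx
    obtain ⟨j, hj, rfl⟩ := hx
    rw [List.getElem_drop]
    have hjl : s + j < l.length := by have := l.length_drop (i := s); omega
    have := h (s + j) (by omega) hjl
    rw [List.getD_eq_getElem _ _ hjl] at this
    simpa using this

lemma foFrom_succ_of_ne (l : List Char) (p : Nat) (c : Char) (hp : p < l.length)
    (h : l.getD p ' ' ≠ c) : foFrom l p c = foFrom l (p + 1) c := by
  unfold foFrom
  rw [List.drop_eq_getElem_cons hp, List.findIdx?_cons]
  rw [if_neg (by rw [← List.getD_eq_getElem l ' ' hp] at *; simpa using h)]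
  rw [Option.map_map]
  congr 1
  funext k
  simp; omega

lemma foFrom_self (l : List Char) (p : Nat) (c : Char) (hp : p < l.length)
    (h : l.getD p ' ' = c) : foFrom l p c = some p := by
  rw [foFrom_eq_some_iff]
  exact ⟨le_refl p, hp, h, by intro i h1 h2; omega⟩

lemma pyRange_desc (n : Nat) :
    PySem.List.pyRange (n : Int) 0 (-1) = (List.range n).map (fun k : Nat => ((n : Int) - (k : Int))) := by
  unfold PySem.List.pyRange
  norm_num
  rcases Nat.eq_zero_or_pos n with h | h
  · subst h; simp
  · rw [if_pos (by exact_mod_cast h)]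
    norm_num
    intro a _
    ring

lemma getD_set (xs : List Int) (i j : Nat) (v : Int) (hj : j < xs.length) :
    (xs.set i v).getD j 0 = if i = j then v else xs.getD j 0 := by
  rw [List.getD_eq_getElem _ _ (by simpa using hj), List.getElem_set]
  split
  · rfl
  · rw [List.getD_eq_getElem _ _ hj]

lemma invA (l : List Char) (t : Nat) (ht : t ≤ l.length) :
    (((List.range t).map (fun k : Nat => ((l.length : Int) - (k : Int)))).foldl (stepA l)
        (List.replicate l.length (-1), PySem.Dict.empty)).1.length = l.length ∧
    (∀ j, j < l.length →
      (((List.range t).map (fun k : Nat => ((l.length : Int) - (k : Int)))).foldl (stepA l)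
        (List.replicate l.length (-1), PySem.Dict.empty)).1.getD j 0 =
        if l.length - t ≤ j then nxt l j else -1) ∧
    (∀ c, (((List.range t).map (fun k : Nat => ((l.length : Int) - (k : Int)))).foldl (stepA l)
        (List.replicate l.length (-1), PySem.Dict.empty)).2.get? c =
        (foFrom l (l.length - t) c).map (fun p : Nat => ((p : Nat) : Int))) := by
  induction t with
  | zero =>
    refine ⟨by simp, ?_, ?_⟩
    · intro j hj
      rw [if_neg (by omega)]
      exact List.getD_replicate _ hj
    · intro c
      rw [Nat.sub_zero, foFrom_eq_none_iff l l.length c |>.mpr (by intro i h1 h2; omega)]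
      simp [PySem.Dict.get?_empty]
  | succ t ih =>
    have ht' : t ≤ l.length := by omega
    have htn : t < l.length := by omega
    obtain ⟨ihlen, ihX, ihD⟩ := ih ht'
    rw [List.range_succ, List.map_append, List.foldl_append]
    set st := (((List.range t).map (fun k : Nat => ((l.length : Int) - (k : Int)))).foldl (stepA l)
        (List.replicate l.length (-1), PySem.Dict.empty)) with hst
    simp only [List.map_cons, List.map_nil, List.foldl_cons, List.foldl_nil]
    -- the processed index
    set p : Nat := l.length - t - 1 with hp
    have hpl : p < l.length := by omega
    have hcast : ((l.length : Int) - t) - 1 = (p : Nat) := by omega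
    have hget : PySem.List.pyGet? l (((l.length : Int) - t) - 1) = some (l[p]'hpl) := by
      rw [hcast, PySem.List.pyGet?_natCast, List.getElem?_eq_getElem hpl]
    have hcp : l[p]'hpl = l.getD p ' ' := (List.getD_eq_getElem l ' ' hpl).symm
    have hnt : l.length - t = p + 1 := by omega
    have hdict : st.2.get? (l[p]'hpl) = (foFrom l (p + 1) (l.getD p ' ')).map (fun q : Nat => ((q : Nat) : Int)) := by
      rw [ihD, hnt, hcp]
    have htoNat : (((l.length : Int) - t) - 1).toNat = p := by omega
    -- the new dictionary is the same in both branches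
    have hdict' : ∀ c, (st.2.insert (l[p]'hpl) (((l.length : Int) - t) - 1)).get? c =
        (foFrom l (l.length - (t+1)) c).map (fun q : Nat => ((q : Nat) : Int)) := by
      intro c
      have hl : l.length - (t+1) = p := by omega
      rw [hl]
      by_cases hc : c = l[p]'hpl
      · subst hc
        rw [PySem.Dict.get?_insert_self]
        rw [foFrom_self l p (l[p]'hpl) hpl hcp.symm]
        simp [hcast]
      · rw [PySem.Dict.get?_insert_of_ne _ _ hc,
          foFrom_succ_of_ne l p c hpl (by rw [← hcp]; exact fun h => hc h.symm), ihD, hnt]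
    -- the written value is nxt l p in both branches
    unfold stepA
    rw [hget]
    dsimp only
    cases hfo : foFrom l (p + 1) (l.getD p ' ') with
    | some k =>
      rw [hfo, Option.map_some] at hdict
      rw [hdict]
      refine ⟨by simpa using ihlen, ?_, hdict'⟩
      intro j hj
      rw [htoNat, getD_set _ _ _ _ (by rw [ihlen]; exact hj)]
      by_cases hjp : p = j
      · subst hjp
        rw [if_pos rfl, if_pos (by omega)]
        unfold nxt; rw [hfo]
      · rw [if_neg hjp, ihX j hj]
        split_ifs <;> first | rfl | omega
    | none =>
      rw [hfo, Option.map_none] at hdict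
      rw [hdict]
      refine ⟨by simpa using ihlen, ?_, hdict'⟩
      intro j hj
      rw [htoNat, getD_set _ _ _ _ (by rw [ihlen]; exact hj)]
      by_cases hjp : p = j
      · subst hjp
        rw [if_pos rfl, if_pos (by omega)]
        unfold nxt; rw [hfo]
      · rw [if_neg hjp, ihX j hj]
        split_ifs <;> first | rfl | omega

-- B's inner scan over range(s, n) is the first occurrence from s
lemma find_scan (l : List Char) (c : Char) (fuel : Nat) :
    ∀ s : Nat, l.length = s + fuel →
    (PySem.List.pyRange (s : Int) (l.length : Int) 1).find?
        (fun k => PySem.List.pyGet? l k == some c) =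
      (foFrom l s c).map (fun p : Nat => ((p : Nat) : Int)) := by
  induction fuel with
  | zero =>
    intro s hs
    rw [PySem.List.pyRange_one_eq_nil (by omega)]
    rw [foFrom_eq_none_iff l s c |>.mpr (by intro i h1 h2; omega)]
    rfl
  | succ fuel ih =>
    intro s hs
    have hsl : s < l.length := by omega
    rw [PySem.List.pyRange_one_cons (by exact_mod_cast hsl), List.find?_cons]
    have hget : PySem.List.pyGet? l (s : Int) = some (l[s]'hsl) := by
      rw [PySem.List.pyGet?_natCast, List.getElem?_eq_getElem hsl]
    rw [hget]
    by_cases hc : l.getD s ' ' = c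
    · have hbeq : (some (l[s]'hsl) == some c) = true := by
        rw [List.getD_eq_getElem l ' ' hsl] at hc; simp [hc]
      rw [hbeq, foFrom_self l s c hsl hc]
      rfl
    · have hbeq : (some (l[s]'hsl) == some c) = false := by
        rw [List.getD_eq_getElem l ' ' hsl] at hc; simpa using hc
      rw [hbeq]
      show List.find? _ _ = _
      have : ((s : Int) + 1) = ((s + 1 : Nat) : Int) := by push_cast; ring
      rw [this, ih (s + 1) (by omega), foFrom_succ_of_ne l s c hsl hc]

-- B's output is [nxt l 0, …, nxt l (n-1)]
lemma altB (w : String) :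
    comp_x_alt w = (List.range w.toList.length).map (fun j => nxt w.toList j) := by
  unfold comp_x_alt
  rw [PySem.List.pyRange_zero_natCast, List.map_map]
  apply List.map_congr_left
  intro j hj
  rw [List.mem_range] at hj
  dsimp only [Function.comp]
  have hgj : PySem.List.pyGet? w.toList ((j : Nat) : Int) = some (w.toList.getD j ' ') := by
    rw [PySem.List.pyGet?_natCast, List.getElem?_eq_getElem hj,
      List.getD_eq_getElem _ _ hj]
  rw [hgj]
  have : ((j : Int) + 1) = ((j + 1 : Nat) : Int) := by push_cast; ring
  rw [this, find_scan w.toList (w.toList.getD j ' ') (w.toList.length - (j + 1)) (j + 1) (by omega)]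
  unfold nxt
  cases foFrom w.toList (j + 1) (w.toList.getD j ' ') <;> rfl

-- ===== VERDICT (by name: the statement is the Claim_ definition above) =====
theorem comp_x_spec : Claim_equal_comp_x := by
  intro w _
  unfold Spec_comp_x comp_x
  rw [pyRange_desc, altB]
  obtain ⟨alen, aX, -⟩ := invA w.toList w.toList.length le_rfl
  apply List.ext_getElem (by rw [alen]; simp)
  intro i h1 h2
  have hi : i < w.toList.length := by rwa [alen] at h1
  have ha := aX i hi
  rw [List.getD_eq_getElem _ _ h1, if_pos (by omega)] at ha
  rw [ha]
  simp
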